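-- pv_equiv track=rewrite | github.com/Harshitjasuja/Lexical-Analyzer | final.py | check_cpp_syntax
-- ===== SOURCE A (Python) =====
-- def check_cpp_syntax(code):
--     """Basic C++ syntax checking"""
--     errors = []
--     lines = code.split('\n')
--
--     # Check for includes
--     has_include = any('#include' in line for line in lines)
--     if not has_include:
--         errors.append("No #include statements found")
--
--     # Check for main function
--     has_main = any('main' in line and '(' in line for line in lines)
--     if not has_main:
--         errors.append("No main function found")
--
--     return errors
-- ===== SOURCE B (Python) =====
-- def check_cpp_syntax(code):
--     """Basic C++ syntax checking via one streaming pass over the characters: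
--     a rolling 8-char tail window per line replaces split() and substring scans."""
--     has_include = False
--     has_main = False
--     w = ''              # last (up to) 8 chars of the current line
--     line_main = False
--     line_paren = False
--     for c in code:
--         if c == '\n':
--             w = ''
--             line_main = False
--             line_paren = False
--         else:
--             w = (w + c)[-8:]
--             if w.endswith('#include'):
--                 has_include = True
--             if w.endswith('main'):
--                 line_main = True
--             if c == '(':
--                 line_paren = True
--             if line_main and line_paren:
--                 has_main = True
--     errors = []
--     if not has_include:
--         errors.append("No #include statements found")
--     if not has_main:
--         errors.append("No main function found")
--     return errors
-- ===== Notes on version B (the rewrite author's own statement) =====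
-- stated objective: alternative
-- what changed: B never splits the code into lines and never calls a substring search: it streams over the characters once, keeping a rolling 8-character tail window of the current line (reset at each newline), testing that window's end for the include directive and for the main pattern plus an open-paren flag, and building the error list from the resulting booleans.
import Mathlib
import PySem

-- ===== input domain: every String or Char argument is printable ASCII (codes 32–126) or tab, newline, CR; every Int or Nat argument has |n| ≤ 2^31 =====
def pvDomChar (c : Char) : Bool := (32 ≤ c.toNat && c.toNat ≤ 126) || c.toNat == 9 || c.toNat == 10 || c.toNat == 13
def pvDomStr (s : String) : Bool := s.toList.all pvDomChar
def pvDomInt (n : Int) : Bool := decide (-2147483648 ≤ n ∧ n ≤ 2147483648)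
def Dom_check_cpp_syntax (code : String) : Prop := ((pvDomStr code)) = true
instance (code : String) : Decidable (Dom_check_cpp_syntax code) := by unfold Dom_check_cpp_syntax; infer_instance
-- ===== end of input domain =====

-- B replaces A's split-into-lines plus two any()/substring scans by one streaming pass over the
-- characters with a rolling 8-char tail window per line (alternative algorithm, same result).

-- ===== PORT A =====
def check_cpp_syntax (code : String) : List String :=
  let errors : List String := []
  let lines := ((PySem.Str.split? code "\n").getD [])
  let has_include := lines.any (fun line => PySem.Str.isIn "#include" line)
  let errors := if !has_include then errors ++ ["No #include statements found"] else errors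
  let has_main := lines.any (fun line => PySem.Str.isIn "main" line && PySem.Str.isIn "(" line)
  let errors := if !has_main then errors ++ ["No main function found"] else errors
  errors

-- ===== PORT B =====
-- loop state of Source B: (has_include, has_main, w, line_main, line_paren); w is the buffer string,
-- held as List Char (the PySem representation of its characters)
structure PVSt where
  hasInc : Bool
  hasMain : Bool
  w : List Char
  lineMain : Bool
  lineParen : Bool
deriving Repr, DecidableEq

-- one iteration of Source B's for-loop; (w + c)[-8:] is PySem.List.slice with start -8,
-- w.endswith(p) is PySem.Chars.endswith
def pvStep (s : PVSt) (c : Char) : PVSt :=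
  if c = '\n' then { s with w := [], lineMain := false, lineParen := false }
  else
    let w := PySem.List.slice (s.w ++ [c]) (some (-8)) none
    let hasInc := if PySem.Chars.endswith w "#include".toList then true else s.hasInc
    let lineMain := if PySem.Chars.endswith w "main".toList then true else s.lineMain
    let lineParen := if c = '(' then true else s.lineParen
    let hasMain := if lineMain && lineParen then true else s.hasMain
    ⟨hasInc, hasMain, w, lineMain, lineParen⟩

def check_cpp_syntax_alt (code : String) : List String :=
  let fin := code.toList.foldl pvStep ⟨false, false, [], false, false⟩
  let errors : List String := []
  let errors := if !fin.hasInc then errors ++ ["No #include statements found"] else errors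
  let errors := if !fin.hasMain then errors ++ ["No main function found"] else errors
  errors

-- ===== PRECONDITION & SPEC =====
def Spec_check_cpp_syntax (code : String) (out : List String) : Prop := out = check_cpp_syntax_alt code
instance (code : String) (out : List String) : Decidable (Spec_check_cpp_syntax code out) := by unfold Spec_check_cpp_syntax; infer_instance

-- ===== CLAIM (what is proved, stated in full; the proofs are below) =====
def Claim_equal_check_cpp_syntax : Prop := ∀ (code : String), Dom_check_cpp_syntax code → Spec_check_cpp_syntax code (check_cpp_syntax code)

-- ===== LEMMAS AND PROOFS =====

def pvInc : List Char := "#include".toList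
def pvMn : List Char := "main".toList

def pvBInc (l : List Char) : Bool := decide (pvInc <:+: l)
def pvBMn (l : List Char) : Bool := decide (pvMn <:+: l)
def pvBPar (l : List Char) : Bool := decide (['('] <:+: l)

-- the lines of a character list, by clean structural recursion (= split('\n'))
def pvLines : List Char → List (List Char)
  | [] => [[]]
  | c :: cs =>
    if c = '\n' then [] :: pvLines cs
    else
      match pvLines cs with
      | [] => [[c]]
      | l :: ls => (c :: l) :: ls

theorem pvLines_ne_nil (cs : List Char) : pvLines cs ≠ [] := by
  cases cs with
  | nil => simp [pvLines]
  | cons c cs =>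
    simp only [pvLines]
    split_ifs
    · simp
    · cases h : pvLines cs <;> simp

-- prepend r to the first line
def pvExt (r : List Char) : List (List Char) → List (List Char)
  | [] => [r]
  | l :: ls => (r ++ l) :: ls

theorem pvExt_nil (L : List (List Char)) (h : L ≠ []) : pvExt [] L = L := by
  cases L with
  | nil => exact absurd rfl h
  | cons l ls => simp [pvExt]

theorem pvExt_snoc (r : List Char) (c : Char) (cs : List Char) (hc : c ≠ '\n') :
    pvExt r (pvLines (c :: cs)) = pvExt (r ++ [c]) (pvLines cs) := by
  simp only [pvLines, if_neg hc]
  cases h : pvLines cs with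
  | nil => exact absurd h (pvLines_ne_nil cs)
  | cons l ls => simp [pvExt]

theorem pv_go_spec (l : List Char) : ∀ (fuel : Nat) (cur : List Char) (acc : List (List Char)),
    l.length ≤ fuel →
    PySem.Chars.splitOn.go ['\n'] fuel l cur acc = acc.reverse ++ pvExt cur.reverse (pvLines l) := by
  induction l with
  | nil =>
    intro fuel cur acc _
    cases fuel <;> simp [PySem.Chars.splitOn.go, pvLines, pvExt]
  | cons c rest ih =>
    intro fuel cur acc hf
    cases fuel with
    | zero => simp at hf
    | succ f =>
      by_cases hc : c = '\n'
      · subst hc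
        have : PySem.Chars.splitOn.go ['\n'] (f + 1) ('\n' :: rest) cur acc
            = PySem.Chars.splitOn.go ['\n'] f rest [] (cur.reverse :: acc) := by
          simp [PySem.Chars.splitOn.go, List.isPrefixOf]
        rw [this, ih f [] (cur.reverse :: acc) (by simpa using Nat.le_of_succ_le_succ hf)]
        cases h : pvLines rest with
        | nil => exact absurd h (pvLines_ne_nil rest)
        | cons l ls => simp [pvLines, pvExt, h]
      · have : PySem.Chars.splitOn.go ['\n'] (f + 1) (c :: rest) cur acc
            = PySem.Chars.splitOn.go ['\n'] f rest (c :: cur) acc := by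
          simp [PySem.Chars.splitOn.go, List.isPrefixOf, Ne.symm hc]
        rw [this, ih f (c :: cur) acc (by simpa using Nat.le_of_succ_le_succ hf)]
        simp only [pvLines, if_neg hc]
        cases h : pvLines rest with
        | nil => exact absurd h (pvLines_ne_nil rest)
        | cons l ls => simp [pvExt]

theorem pv_splitOn (cs : List Char) : PySem.Chars.splitOn cs ['\n'] = pvLines cs := by
  unfold PySem.Chars.splitOn
  rw [pv_go_spec cs (cs.length + 1) [] [] (by omega)]
  simp [pvExt_nil _ (pvLines_ne_nil cs)]

-- t is an infix of s ++ [c] iff it is an infix of s or a suffix of s ++ [c]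
theorem pv_infix_snoc (t s : List Char) (c : Char) : t <:+: s ++ [c] ↔ t <:+: s ∨ t <:+ s ++ [c] := by
  constructor
  · rintro ⟨u, v, h⟩
    rcases List.eq_nil_or_concat v with rfl | ⟨v', d, rfl⟩
    · right; exact ⟨u, by simpa using h⟩
    · left
      have h2 : (u ++ t ++ v') ++ [d] = s ++ [c] := by
        simpa [List.append_assoc] using h
      obtain ⟨h3, -⟩ := List.append_inj' h2 (by simp)
      exact ⟨u, v', by simpa [List.append_assoc] using h3⟩
  · rintro (h | h)
    · exact h.trans ⟨[], [c], by simp⟩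
    · exact h.isInfix

theorem pv_suffix_singleton (a c : Char) (s : List Char) : [a] <:+ s ++ [c] ↔ a = c := by
  constructor
  · rintro ⟨u, h⟩
    have h2 : (u ++ []) ++ [a] = s ++ [c] := by simpa using h
    obtain ⟨-, h3⟩ := List.append_inj' h2 (by simp)
    simpa using h3
  · rintro rfl
    exact ⟨s, rfl⟩

-- window property: a pattern of length ≤ 8 is a suffix of the window iff of the whole line prefix
theorem pv_window (t r w : List Char) (hw : w <:+ r) (hlen : w.length = min 8 r.length)
    (ht : t.length ≤ 8) : t <:+ w ↔ t <:+ r := by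
  constructor
  · exact fun h => h.trans hw
  · intro h
    rcases List.suffix_or_suffix_of_suffix h hw with h' | h'
    · exact h'
    · have hl : t.length ≤ w.length := by
        have := h.length_le
        omega
      have := h'.eq_of_length_le hl
      exact this ▸ List.suffix_refl t
theorem pv_bool_eq_decide {b : Bool} {p : Prop} [Decidable p] (h : b = true ↔ p) : b = decide p := by
  cases b <;> simp_all

theorem pv_slice_spec (l : List Char) :
    PySem.List.slice l (some (-8)) none = l.drop (l.length - 8) := by
  have h : PySem.List.clampIdx l.length (-8) = l.length - 8 := by
    simp only [PySem.List.clampIdx]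
    split_ifs <;> omega
  simp only [PySem.List.slice, h]
  apply List.take_of_length_le
  simp [List.length_drop]

-- one non-newline step preserves the loop invariant
theorem pvStep_char (pI pM : Bool) (r w : List Char) (c : Char) (hc : c ≠ '\n')
    (hw : w <:+ r) (hlen : w.length = min 8 r.length) :
    pvStep ⟨pI || pvBInc r, pM || (pvBMn r && pvBPar r), w, pvBMn r, pvBPar r⟩ c =
      ⟨pI || pvBInc (r ++ [c]), pM || (pvBMn (r ++ [c]) && pvBPar (r ++ [c])),
        (w ++ [c]).drop (w.length + 1 - 8), pvBMn (r ++ [c]), pvBPar (r ++ [c])⟩ := by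
  have hw' : (w ++ [c]).drop (w.length + 1 - 8) <:+ r ++ [c] := by
    obtain ⟨u, rfl⟩ := hw
    exact (List.drop_suffix _ _).trans ⟨u, by simp⟩
  have hlen' : ((w ++ [c]).drop (w.length + 1 - 8)).length = min 8 (r ++ [c]).length := by
    simp [List.length_drop]
    omega
  have eInc : PySem.Chars.endswith ((w ++ [c]).drop (w.length + 1 - 8)) "#include".toList
      = decide (pvInc <:+ r ++ [c]) := by
    apply pv_bool_eq_decide
    exact (PySem.Chars.endswith_iff _ _).trans
      (pv_window pvInc (r ++ [c]) _ hw' hlen' (by decide))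
  have eMn : PySem.Chars.endswith ((w ++ [c]).drop (w.length + 1 - 8)) "main".toList
      = decide (pvMn <:+ r ++ [c]) := by
    apply pv_bool_eq_decide
    exact (PySem.Chars.endswith_iff _ _).trans
      (pv_window pvMn (r ++ [c]) _ hw' hlen' (by decide))
  simp only [pvStep, if_neg hc, pv_slice_spec, List.length_append, List.length_cons,
    List.length_nil, Nat.zero_add, eInc, eMn]
  simp only [pvBInc, pvBMn, pvBPar, PVSt.mk.injEq]
  refine ⟨?_, ?_, ?_, ?_, ?_⟩ <;>
  · by_cases hA : pvInc <:+ r ++ [c] <;> by_cases hB : pvMn <:+ r ++ [c] <;>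
    by_cases hC : c = '(' <;>
    by_cases hA2 : pvInc <:+: r <;> by_cases hB2 : pvMn <:+: r <;> by_cases hC2 : ['('] <:+: r <;>
    simp [pv_infix_snoc, pv_suffix_singleton, hA, hB, hC, hA2, hB2, hC2, eq_comm,
      Bool.or_comm]

theorem pvBInc_nil : pvBInc [] = false := by decide
theorem pvBMn_nil : pvBMn [] = false := by decide
theorem pvBPar_nil : pvBPar [] = false := by decide

-- the fold invariant: flags after consuming cs, given already-consumed current-line prefix r
theorem pv_fold (cs : List Char) : ∀ (pI pM : Bool) (r w : List Char),
    w <:+ r → w.length = min 8 r.length →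
    (List.foldl pvStep ⟨pI || pvBInc r, pM || (pvBMn r && pvBPar r), w, pvBMn r, pvBPar r⟩ cs).hasInc
      = (pI || (pvExt r (pvLines cs)).any pvBInc) ∧
    (List.foldl pvStep ⟨pI || pvBInc r, pM || (pvBMn r && pvBPar r), w, pvBMn r, pvBPar r⟩ cs).hasMain
      = (pM || (pvExt r (pvLines cs)).any (fun l => pvBMn l && pvBPar l)) := by
  induction cs with
  | nil =>
    intro pI pM r w hw hlen
    simp [pvLines, pvExt]
  | cons c cs ih =>
    intro pI pM r w hw hlen
    by_cases hc : c = '\n'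
    · subst hc
      have hstep : pvStep ⟨pI || pvBInc r, pM || (pvBMn r && pvBPar r), w, pvBMn r, pvBPar r⟩ '\n'
          = ⟨(pI || pvBInc r) || pvBInc [], (pM || (pvBMn r && pvBPar r)) || (pvBMn [] && pvBPar []),
              [], pvBMn [], pvBPar []⟩ := by
        simp [pvStep, pvBInc_nil, pvBMn_nil, pvBPar_nil]
      rw [List.foldl_cons, hstep]
      obtain ⟨h1, h2⟩ := ih (pI || pvBInc r) (pM || (pvBMn r && pvBPar r)) [] []
        List.nil_suffix (by simp)
      rw [h1, h2]
      cases h : pvLines cs with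
      | nil => exact absurd h (pvLines_ne_nil cs)
      | cons l ls =>
        constructor
        · simp [pvLines, pvExt, h, Bool.or_assoc]
        · simp [pvLines, pvExt, h, Bool.or_assoc]
    · rw [List.foldl_cons, pvStep_char pI pM r w c hc hw hlen]
      obtain ⟨h1, h2⟩ := ih pI pM (r ++ [c]) ((w ++ [c]).drop (w.length + 1 - 8))
        (by obtain ⟨u, rfl⟩ := hw; exact (List.drop_suffix _ _).trans ⟨u, by simp⟩)
        (by simp [List.length_drop]; omega)
      rw [h1, h2, pvExt_snoc r c cs hc]
      exact ⟨rfl, rfl⟩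

theorem pv_isIn_inc (l : List Char) :
    PySem.Chars.isIn ['#', 'i', 'n', 'c', 'l', 'u', 'd', 'e'] l = pvBInc l :=
  pv_bool_eq_decide (by simpa [pvInc] using PySem.Chars.isIn_iff_infix "#include".toList l)
theorem pv_isIn_mn (l : List Char) : PySem.Chars.isIn ['m', 'a', 'i', 'n'] l = pvBMn l :=
  pv_bool_eq_decide (by simpa [pvMn] using PySem.Chars.isIn_iff_infix "main".toList l)
theorem pv_isIn_par (l : List Char) : PySem.Chars.isIn ['('] l = pvBPar l :=
  pv_bool_eq_decide (PySem.Chars.isIn_iff_infix _ _)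

-- ===== VERDICT (by name: the statement is the Claim_ definition above) =====
theorem check_cpp_syntax_spec : Claim_equal_check_cpp_syntax := by
  intro code _
  unfold Spec_check_cpp_syntax check_cpp_syntax check_cpp_syntax_alt
  have hsplit : (PySem.Str.split? code "\n").getD []
      = (pvLines code.toList).map String.ofList := by
    simp [PySem.Str.split?, PySem.Chars.split?, pv_splitOn]
  have hinit : (⟨false, false, [], false, false⟩ : PVSt)
      = ⟨false || pvBInc [], false || (pvBMn [] && pvBPar []), [], pvBMn [], pvBPar []⟩ := by
    simp [pvBInc_nil, pvBMn_nil, pvBPar_nil]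
  obtain ⟨h1, h2⟩ := pv_fold code.toList false false [] [] List.nil_suffix (by simp)
  simp only [hsplit, hinit, h1, h2]
  simp [List.any_map, pv_isIn_inc, pv_isIn_mn, pv_isIn_par,
    pvExt_nil _ (pvLines_ne_nil code.toList), Function.comp]
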